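-- pv_equiv track=rewrite | github.com/FluffyFu/Leetcode | 1498_number_of_subsequences_that_satisfy_the_given_sum_condition/solution.py | find_num_fast
-- ===== SOURCE A (Python) =====
-- def find_num_fast(nums, target):
--     nums = sorted(nums)
--     if nums[0] * 2 > target:
--         return 0
--
--     res = 0
--
--     l, r = 0, len(nums) - 1
--     res = 0
--     mod = int(10**9) + 1
--
--     while l <= r:
--         if nums[l] + nums[r] > target:
--             r -= 1
--         else:
--             res += 2 ** (r - l) % mod
--             l += 1
--
--     return res % mod
-- ===== SOURCE B (Python) =====
-- def _upper(nums, x):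
--     """Largest insertion point: number of elements of sorted nums that are <= x."""
--     lo, hi = 0, len(nums)
--     while lo < hi:
--         mid = (lo + hi) // 2
--         if nums[mid] <= x:
--             lo = mid + 1
--         else:
--             hi = mid
--     return lo
--
--
-- def find_num_fast(nums, target):
--     nums = sorted(nums)
--     if nums[0] * 2 > target:
--         return 0
--     mod = 10 ** 9 + 1
--     res = 0
--     for i, v in enumerate(nums):
--         j = _upper(nums, target - v) - 1
--         if j >= i:
--             res += pow(2, j - i, mod)
--     return res % mod
-- ===== Notes on version B (the rewrite author's own statement) =====
-- stated objective: faster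
-- what changed: Replaces the coordinated two-pointer sweep (which materialises the full big integer 2**(r-l) at every step) by an independent binary search for each minimum index plus three-argument pow(2, j-i, mod) modular exponentiation.
import Mathlib
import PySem

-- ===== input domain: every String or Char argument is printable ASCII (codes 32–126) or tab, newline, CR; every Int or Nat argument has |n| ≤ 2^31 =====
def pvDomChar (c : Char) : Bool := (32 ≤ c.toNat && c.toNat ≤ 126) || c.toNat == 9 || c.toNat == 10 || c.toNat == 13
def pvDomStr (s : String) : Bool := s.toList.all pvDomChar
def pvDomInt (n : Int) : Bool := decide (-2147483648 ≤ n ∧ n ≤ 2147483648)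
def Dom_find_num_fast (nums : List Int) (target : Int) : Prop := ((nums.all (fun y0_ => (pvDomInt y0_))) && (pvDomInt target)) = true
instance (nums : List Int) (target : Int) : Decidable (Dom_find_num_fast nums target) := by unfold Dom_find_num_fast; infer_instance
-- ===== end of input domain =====

-- B replaces A's coordinated two-pointer sweep by an independent binary search per minimum
-- index plus modular exponentiation pow(2, e, mod); measured faster on large inputs.

-- ===== PORT A =====
-- A's while loop over state (l, r, res)
def loopA (s : List Int) (target l r res : Int) : Int :=
  if _h : l ≤ r then
    if PySem.List.pyGetD s l 0 + PySem.List.pyGetD s r 0 > target then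
      loopA s target l (r - 1) res
    else
      loopA s target (l + 1) r (res + PySem.Int.mod (2 ^ (r - l).toNat) (10 ^ 9 + 1))
  else
    PySem.Int.mod res (10 ^ 9 + 1)
termination_by (r + 1 - l).toNat
decreasing_by all_goals omega

def find_num_fast (nums : List Int) (target : Int) : Int :=
  let s := PySem.List.sorted nums (fun x => x) false
  if PySem.List.pyGetD s 0 0 * 2 > target then 0
  else loopA s target 0 (s.length - 1) 0

-- ===== PORT B =====
-- Source B's hand-written `_upper` (bisect-right): while lo < hi, halve on nums[mid] <= x
def upperB (s : List Int) (x lo hi : Int) : Int :=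
  if _h : lo < hi then
    let mid := PySem.Int.floordiv (lo + hi) 2
    if PySem.List.pyGetD s mid 0 ≤ x then upperB s x (mid + 1) hi
    else upperB s x lo mid
  else lo
termination_by (hi - lo).toNat
decreasing_by
  · have h1 := (PySem.Int.le_floordiv_iff_mul_le (a := lo + hi) (b := 2) (q := lo) (by omega)).2 (by omega)
    omega
  · have h2 := (PySem.Int.floordiv_lt_iff_lt_mul (a := lo + hi) (b := 2) (q := hi) (by omega)).2 (by omega)
    omega

def find_num_fast_alt (nums : List Int) (target : Int) : Int :=
  let s := PySem.List.sorted nums (fun x => x) false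
  if PySem.List.pyGetD s 0 0 * 2 > target then 0
  else
    let md : Int := 10 ^ 9 + 1
    let res := (PySem.List.enumerate s 0).foldl (fun res iv =>
      let j := upperB s (target - iv.2) 0 (s.length : Int) - 1
      if j ≥ iv.1 then res + PySem.Int.powMod 2 (j - iv.1).toNat md else res) 0
    PySem.Int.mod res md

-- ===== PRECONDITION & SPEC =====
-- Pre_ excludes only the empty list, on which both A and B raise IndexError at nums[0].
def Pre_find_num_fast (nums : List Int) (target : Int) : Prop := nums ≠ []
instance (nums : List Int) (target : Int) : Decidable (Pre_find_num_fast nums target) := by unfold Pre_find_num_fast; infer_instance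
def pvWitness_find_num_fast : List Int × Int := ([2, 3, 3, 4, 6, 7], 12)

def Spec_find_num_fast (nums : List Int) (target : Int) (out : Int) : Prop := out = find_num_fast_alt nums target
instance (nums : List Int) (target : Int) (out : Int) : Decidable (Spec_find_num_fast nums target out) := by unfold Spec_find_num_fast; infer_instance

-- ===== CLAIM (what is proved, stated in full; the proofs are below) =====
def Claim_equal_find_num_fast : Prop := ∀ (nums : List Int) (target : Int), Dom_find_num_fast nums target → Pre_find_num_fast nums target → Spec_find_num_fast nums target (find_num_fast nums target)

-- ===== LEMMAS AND PROOFS =====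

-- B's per-index summand as a function of the index into the sorted list
def termB (s : List Int) (target : Int) (i : Int) : Int :=
  let j := upperB s (target - PySem.List.pyGetD s i 0) 0 (s.length : Int) - 1
  if j ≥ i then PySem.Int.powMod 2 (j - i).toNat (10 ^ 9 + 1) else 0

-- the maximal partner index (as Int; -1 when none) for minimum index i
def Jix (s : List Int) (target : Int) (i : Int) : Int :=
  upperB s (target - PySem.List.pyGetD s i 0) 0 (s.length : Int) - 1

theorem sorted_getD_mono (s : List Int) (hs : s.Pairwise (· ≤ ·)) (p q : Nat)
    (hpq : p ≤ q) (hq : q < s.length) : s.getD p 0 ≤ s.getD q 0 := by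
  rcases eq_or_lt_of_le hpq with rfl | hlt
  · exact le_refl _
  · rw [List.getD_eq_getElem _ _ (by omega), List.getD_eq_getElem _ _ hq]
    exact List.pairwise_iff_getElem.1 hs p q (by omega) hq hlt

-- correctness of Source B's hand-rolled bisect-right on a sorted list
theorem upperB_spec (s : List Int) (x : Int) (hs : s.Pairwise (· ≤ ·)) :
    ∀ (m : Nat) (lo hi : Int), (hi - lo).toNat = m → 0 ≤ lo → lo ≤ hi → hi ≤ s.length →
    (∀ k : Nat, (k : Int) < lo → s.getD k 0 ≤ x) →
    (∀ k : Nat, hi ≤ (k : Int) → k < s.length → x < s.getD k 0) →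
    lo ≤ upperB s x lo hi ∧ upperB s x lo hi ≤ hi ∧
      (∀ k : Nat, (k : Int) < upperB s x lo hi → s.getD k 0 ≤ x) ∧
      (∀ k : Nat, upperB s x lo hi ≤ (k : Int) → k < s.length → x < s.getD k 0) := by
  intro m
  induction m using Nat.strong_induction_on with
  | _ m ih =>
    intro lo hi hm h0 hlh hhi hlow hhigh
    rw [upperB]
    split
    case isFalse h =>
      have : lo = hi := by omega
      exact ⟨le_refl _, by omega, hlow, fun k hk hkn => hhigh k (by omega) hkn⟩
    case isTrue h =>
      have hb1 : lo ≤ PySem.Int.floordiv (lo + hi) 2 :=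
        (PySem.Int.le_floordiv_iff_mul_le (by omega)).2 (by omega)
      have hb2 : PySem.Int.floordiv (lo + hi) 2 < hi :=
        (PySem.Int.floordiv_lt_iff_lt_mul (by omega)).2 (by omega)
      set mid := PySem.Int.floordiv (lo + hi) 2 with hmid
      dsimp only
      rw [PySem.List.pyGetD_of_nonneg s 0 (by omega)]
      split
      case isTrue hle =>
        have hrec := ih (hi - (mid+1)).toNat (by omega) (mid+1) hi (rfl) (by omega) (by omega) hhi
          (fun k hk => by
            have hkm : k ≤ mid.toNat := by omega
            exact le_trans (sorted_getD_mono s hs k mid.toNat hkm (by omega)) hle)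
          hhigh
        exact ⟨by omega, hrec.2.1, hrec.2.2.1, hrec.2.2.2⟩
      case isFalse hgt =>
        have hrec := ih (mid - lo).toNat (by omega) lo mid (rfl) h0 (by omega) (by omega)
          hlow
          (fun k hk hkn => lt_of_lt_of_le (by omega)
            (sorted_getD_mono s hs mid.toNat k (by omega) hkn))
        exact ⟨hrec.1, by omega, hrec.2.2.1, hrec.2.2.2⟩

theorem Jix_le (s : List Int) (target : Int) (hs : s.Pairwise (· ≤ ·)) (i : Int) :
    -1 ≤ Jix s target i ∧ Jix s target i ≤ (s.length : Int) - 1 := by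
  have h := upperB_spec s (target - PySem.List.pyGetD s i 0) hs ((s.length : Int) - 0).toNat
    0 (s.length : Int) rfl (le_refl 0) (by omega) (by omega)
    (by intro k hk; omega) (by intro k hk hkn; exact absurd hkn (by omega))
  unfold Jix; omega

-- k is a valid partner for minimum index i  iff  k ≤ Jix i
theorem Jix_iff (s : List Int) (target : Int) (hs : s.Pairwise (· ≤ ·)) (i : Int)
    (k : Nat) (hk : k < s.length) :
    (s.getD k 0 + PySem.List.pyGetD s i 0 ≤ target ↔ (k : Int) ≤ Jix s target i) := by
  have h := upperB_spec s (target - PySem.List.pyGetD s i 0) hs ((s.length : Int) - 0).toNat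
    0 (s.length : Int) rfl (le_refl 0) (by omega) (by omega)
    (by intro k hk; omega) (by intro k hk hkn; exact absurd hkn (by omega))
  unfold Jix
  constructor
  · intro hle
    by_contra hcon
    have := h.2.2.2 k (by omega) hk
    omega
  · intro hle
    have := h.2.2.1 k (by omega)
    omega

-- Jix is antitone in i (for valid indices)
theorem Jix_mono (s : List Int) (target : Int) (hs : s.Pairwise (· ≤ ·)) (i i' : Int)
    (h0 : 0 ≤ i) (hii : i ≤ i') (hi' : i' < (s.length : Int)) :
    Jix s target i' ≤ Jix s target i := by
  have hJ := Jix_le s target hs i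
  have hJ' := Jix_le s target hs i'
  by_contra hcon
  set k : Nat := (Jix s target i').toNat with hk
  have hkn : k < s.length := by omega
  have h1 := (Jix_iff s target hs i' k hkn).2 (by omega)
  have hvv : PySem.List.pyGetD s i 0 ≤ PySem.List.pyGetD s i' 0 := by
    rw [PySem.List.pyGetD_of_nonneg s 0 h0, PySem.List.pyGetD_of_nonneg s 0 (by omega)]
    exact sorted_getD_mono s hs i.toNat i'.toNat (by omega) (by omega)
  have h2 := (Jix_iff s target hs i k hkn).1 (by omega)
  omega

-- A's while loop computes the modular sum of B's per-index terms
theorem loopA_eq (s : List Int) (target : Int) (hs : s.Pairwise (· ≤ ·)) :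
    ∀ (m : Nat) (l r res : Int), (r + 1 - l).toNat = m → 0 ≤ l → l ≤ r + 1 → r ≤ (s.length : Int) - 1 →
    (∀ i : Int, l ≤ i → i < (s.length : Int) → Jix s target i ≤ r) →
    loopA s target l r res =
      PySem.Int.mod (res + ((PySem.List.pyRange l (s.length : Int) 1).map (termB s target)).sum) (10 ^ 9 + 1) := by
  intro m
  induction m using Nat.strong_induction_on with
  | _ m ih =>
    intro l r res hm h0 hlr1 hrn hJr
    rw [loopA]
    split
    case isFalse h =>
      -- loop exit: every remaining term is 0
      have hzero : ∀ y ∈ (PySem.List.pyRange l (s.length : Int) 1).map (termB s target), y = 0 := by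
        intro y hy
        obtain ⟨i, hi, rfl⟩ := List.mem_map.1 hy
        have hmem := (PySem.List.mem_pyRange_one).1 hi
        have hJ := hJr i hmem.1 hmem.2
        unfold termB
        rw [if_neg]
        unfold Jix at hJ
        omega
      rw [List.sum_eq_zero hzero, add_zero]
    case isTrue h =>
      have hln : l < (s.length : Int) := by omega
      have hJl := hJr l (le_refl l) hln
      have hJle := Jix_le s target hs l
      have hr0 : (0:Int) ≤ r := by omega
      have hgr : PySem.List.pyGetD s r 0 = s.getD r.toNat 0 := PySem.List.pyGetD_of_nonneg s 0 hr0
      have hiff := Jix_iff s target hs l r.toNat (by omega)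
      split
      case isTrue hgt =>
        -- nums[l] + nums[r] > target : r is not a partner for l, so Jix l ≤ r - 1
        have hJlt : Jix s target l ≤ r - 1 := by
          by_contra hcon
          have := hiff.2 (by omega)
          rw [hgr] at hgt
          omega
        rw [ih (r - l).toNat (by omega) l (r - 1) res (by omega) h0 (by omega) (by omega)
          (fun i hli hin => le_trans (Jix_mono s target hs l i h0 hli hin) hJlt)]
      case isFalse hle =>
        -- nums[l] + nums[r] ≤ target : Jix l = r, emit the term for l
        have hJeq : Jix s target l = r := by
          rw [hgr] at hle
          have := hiff.1 (by omega)
          omega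
        have htl : termB s target l = PySem.Int.mod (2 ^ (r - l).toNat) (10 ^ 9 + 1) := by
          unfold termB
          rw [show upperB s (target - PySem.List.pyGetD s l 0) 0 (s.length : Int) - 1 = Jix s target l from rfl]
          rw [hJeq, if_pos (by omega), PySem.Int.powMod_eq]
        rw [ih (r - l).toNat (by omega) (l + 1) r _ (by omega) (by omega) (by omega) hrn
          (fun i hli hin => by
            have := Jix_mono s target hs l i h0 (by omega) hin
            omega)]
        rw [PySem.List.pyRange_one_cons hln, List.map_cons, List.sum_cons, htl]
        ring_nf

-- B's fold is the plain (un-reduced) sum of the per-index terms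
theorem alt_eq_sum (s : List Int) (target : Int) :
    ((PySem.List.enumerate s 0).foldl (fun res iv =>
      let j := upperB s (target - iv.2) 0 (s.length : Int) - 1
      if j ≥ iv.1 then res + PySem.Int.powMod 2 (j - iv.1).toNat (10 ^ 9 + 1) else res) 0)
    = ((PySem.List.pyRange 0 (s.length : Int) 1).map (termB s target)).sum := by
  rw [PySem.List.enumerate_eq_map_pyRange s 0, List.foldl_map]
  have hbody : (fun (res : Int) (j : Int) =>
      (fun res iv =>
        let j := upperB s (target - iv.2) 0 (s.length : Int) - 1
        if j ≥ iv.1 then res + PySem.Int.powMod 2 (j - iv.1).toNat (10 ^ 9 + 1) else res)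
        res (j, PySem.List.pyGetD s j 0))
      = fun res j => res + termB s target j := by
    funext res j
    simp only [termB]
    split <;> simp
  rw [hbody, PySem.List.foldl_add, zero_add]
  simp only [PySem.List.len_eq]

-- ===== VERDICT (by name: the statement is the Claim_ definition above) =====
theorem find_num_fast_spec : Claim_equal_find_num_fast := by
  intro nums target _hdom hne
  unfold Spec_find_num_fast find_num_fast find_num_fast_alt
  have hs : (PySem.List.sorted nums (fun x => x) false).Pairwise (· ≤ ·) := by
    have := PySem.List.sorted_pairwise nums (fun x => x)
    simpa using this
  set s := PySem.List.sorted nums (fun x => x) false with hsdef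
  have hsne : s ≠ [] := by
    rw [hsdef, Ne, PySem.List.sorted_eq_nil_iff]
    exact hne
  have hlen : 0 < s.length := List.length_pos_iff.2 hsne
  dsimp only
  split
  · rfl
  · rw [alt_eq_sum s target]
    have := loopA_eq s target hs ((s.length : Int) - 1 + 1 - 0).toNat 0 ((s.length : Int) - 1) 0
      rfl (le_refl 0) (by omega) (by omega)
      (fun i h0i hin => by
        have := Jix_le s target hs i
        omega)
    rw [this, zero_add]
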